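-- pv_equiv track=rewrite | github.com/Lightless-Labs/third-thoughts | scripts/007-cross-project-graph.py | extract_project_name_ai
-- ===== SOURCE A (Python) =====
-- def extract_project_name_ai(dirname):
--     """Extract a readable project name from a Claude AI project dirname."""
--     name = dirname.lstrip("-")
--     parts = name.split("-")
--     for i, p in enumerate(parts):
--         if p.lower() == "projects":
--             rest = "-".join(parts[i + 1:])
--             if rest:
--                 return rest
--     return name
-- ===== SOURCE B (Python) =====
-- import re
--
-- _PROJ_RE = re.compile(r'(?:^|-)projects-(.+)', re.IGNORECASE | re.DOTALL)
--
-- def extract_project_name_ai(dirname):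
--     """Extract a readable project name from a Claude AI project dirname."""
--     name = dirname.lstrip("-")
--     m = _PROJ_RE.search(name)
--     return m.group(1) if m else name
-- ===== Notes on version B (the rewrite author's own statement) =====
-- stated objective: idiomatic
-- what changed: Replaces the split-into-tokens + enumerate loop and re-join with a single precompiled regex search (?:^|-)projects-(.+) whose leftmost match and required trailing dash encode the token boundary and nonempty-rest condition directly.
import Mathlib
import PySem

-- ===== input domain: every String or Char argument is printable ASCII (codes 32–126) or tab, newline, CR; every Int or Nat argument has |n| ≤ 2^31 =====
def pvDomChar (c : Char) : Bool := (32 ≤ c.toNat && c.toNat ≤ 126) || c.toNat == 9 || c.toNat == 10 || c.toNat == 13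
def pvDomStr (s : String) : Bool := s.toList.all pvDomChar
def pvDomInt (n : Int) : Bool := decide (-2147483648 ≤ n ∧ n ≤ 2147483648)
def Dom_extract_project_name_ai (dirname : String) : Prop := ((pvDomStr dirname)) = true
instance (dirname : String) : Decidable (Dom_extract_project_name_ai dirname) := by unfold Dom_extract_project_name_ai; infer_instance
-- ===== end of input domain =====

-- B replaces A's split-into-tokens + enumerate loop with a single regex search
-- (?:^|-)projects-(.+) (IGNORECASE|DOTALL); objective: idiomatic, same cost.

-- ===== PORT A =====
-- hand port of name.split("-") for the single-character separator "-"; exact: checked against CPython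
def pvSplitDash : List Char → List (List Char)
  | [] => [[]]
  | c :: t =>
      if c = '-' then [] :: pvSplitDash t
      else
        match pvSplitDash t with
        | h :: r => (c :: h) :: r
        | [] => [[c]]

-- the 'for i, p in enumerate(parts)' loop; rest = "-".join(parts[i+1:])
def pvLoopA : List (List Char) → Option (List Char)
  | [] => none
  | p :: ps =>
      if PySem.Chars.lower p = "projects".toList then
        let rest := PySem.Chars.join ['-'] ps
        if rest ≠ [] then some rest else pvLoopA ps
      else pvLoopA ps

def extract_project_name_ai (dirname : String) : String :=
  -- dirname.lstrip("-") ported by hand as dropWhile '-'; exact for a one-character strip set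
  let name := dirname.toList.dropWhile (· == '-')
  match pvLoopA (pvSplitDash name) with
  | some r => String.ofList r
  | none => String.ofList name

-- ===== PORT B =====
-- hand model of re.search(r'(?:^|-)projects-(.+)', name, re.IGNORECASE | re.DOTALL); exact for
-- this pattern: pvTryHere is one anchored match attempt (IGNORECASE = compare lowercased,
-- DOTALL (.+) = any nonempty remainder), pvSearchB tries each later start position, where the
-- (?:^|-) alternation requires the consumed character '-'.
def pvTryHere (l : List Char) : Option (List Char) :=
  if PySem.Chars.lower (List.take 9 l) = "projects-".toList ∧ List.drop 9 l ≠ [] then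
    some (List.drop 9 l)
  else none

def pvSearchB : List Char → Option (List Char)
  | [] => none
  | c :: t =>
      if c = '-' then
        match pvTryHere t with
        | some r => some r
        | none => pvSearchB t
      else pvSearchB t

def extract_project_name_ai_alt (dirname : String) : String :=
  -- dirname.lstrip("-") ported by hand as dropWhile '-'; exact for a one-character strip set
  let name := dirname.toList.dropWhile (· == '-')
  match (match pvTryHere name with | some r => some r | none => pvSearchB name) with
  | some r => String.ofList r
  | none => String.ofList name

-- ===== PRECONDITION & SPEC =====
def Spec_extract_project_name_ai (dirname : String) (out : String) : Prop := out = extract_project_name_ai_alt dirname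
instance (dirname : String) (out : String) : Decidable (Spec_extract_project_name_ai dirname out) := by unfold Spec_extract_project_name_ai; infer_instance

-- ===== CLAIM (what is proved, stated in full; the proofs are below) =====
def Claim_equal_extract_project_name_ai : Prop := ∀ (dirname : String), Dom_extract_project_name_ai dirname → Spec_extract_project_name_ai dirname (extract_project_name_ai dirname)

-- ===== LEMMAS AND PROOFS =====

theorem pv_lowerChar_ne_dash (c : Char) (h : c ≠ '-') : PySem.Chars.lowerChar c ≠ '-' := by
  unfold PySem.Chars.lowerChar
  split_ifs with hc
  · simp only [PySem.Chars.isupper, Bool.and_eq_true, decide_eq_true_eq] at hc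
    have h1 : 65 ≤ c.toNat := hc.1
    have h2 : c.toNat ≤ 90 := hc.2
    intro he
    have h4 := congrArg Char.toNat he
    rw [Char.toNat_ofNat, if_pos (Or.inl (by omega) : Nat.isValidChar (c.toNat + 32))] at h4
    have h3 : ('-').toNat = 45 := rfl
    omega
  · exact h

theorem pv_dash_not_mem_lower (l : List Char) (h : '-' ∉ l) :
    '-' ∉ PySem.Chars.lower l := by
  unfold PySem.Chars.lower
  intro hm
  obtain ⟨c, hc, he⟩ := List.mem_map.mp hm
  exact pv_lowerChar_ne_dash c (fun h' => h (h' ▸ hc)) he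

theorem pv_lower_take_iff (p : List Char) : ∀ (tgt r : List Char), '-' ∉ p → '-' ∉ tgt →
    (PySem.Chars.lower (List.take (tgt.length + 1) (p ++ '-' :: r)) = tgt ++ ['-'] ↔
      PySem.Chars.lower p = tgt) := by
  induction p with
  | nil =>
    intro tgt r _ ht
    cases tgt with
    | nil => simp [PySem.Chars.lower, PySem.Chars.lowerChar, PySem.Chars.isupper]
    | cons a tgt' =>
      have ha : a ≠ '-' := fun h => ht (h ▸ List.mem_cons_self ..)
      simp [PySem.Chars.lower]
      intro h
      exact absurd rfl (h ▸ ha)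
  | cons c p' IH =>
    intro tgt r hp ht
    have hc : c ≠ '-' := fun h => hp (h ▸ List.mem_cons_self ..)
    have hp' : '-' ∉ p' := fun h => hp (List.mem_cons_of_mem _ h)
    cases tgt with
    | nil =>
      simp [PySem.Chars.lower]
      exact fun h => absurd h (pv_lowerChar_ne_dash c hc)
    | cons a tgt' =>
      have ht' : '-' ∉ tgt' := fun h => ht (List.mem_cons_of_mem _ h)
      have IH' := IH tgt' r hp' ht'
      simp only [PySem.Chars.lower] at IH'
      simp only [List.length_cons, List.cons_append, List.take_succ_cons,
        PySem.Chars.lower, List.map_cons, List.cons.injEq]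
      exact and_congr Iff.rfl IH'

theorem pv_tryHere_none (p : List Char) (hp : '-' ∉ p) : pvTryHere p = none := by
  unfold pvTryHere
  rw [if_neg]
  rintro ⟨h1, -⟩
  have : '-' ∉ PySem.Chars.lower (List.take 9 p) :=
    pv_dash_not_mem_lower _ (fun h => hp (List.mem_of_mem_take h))
  rw [h1] at this
  exact this (by decide)

theorem pv_tryHere_append (p r : List Char) (hp : '-' ∉ p) :
    pvTryHere (p ++ '-' :: r) =
      if PySem.Chars.lower p = "projects".toList ∧ r ≠ [] then some r else none := by
  have hproj : ("projects-".toList : List Char) = "projects".toList ++ ['-'] := by decide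
  have hnd : ('-' : Char) ∉ "projects".toList := by decide
  have hlen : ("projects".toList : List Char).length = 8 := by decide
  have hiff := pv_lower_take_iff p "projects".toList r hp hnd
  rw [hlen] at hiff
  by_cases hl : PySem.Chars.lower p = "projects".toList
  · have hplen : p.length = 8 := by
      have := congrArg List.length hl
      simpa [PySem.Chars.lower] using this
    have happ : p ++ '-' :: r = (p ++ ['-']) ++ r := by simp
    have hlen9 : (p ++ ['-']).length = 9 := by simp [hplen]
    have htake : List.take 9 (p ++ '-' :: r) = p ++ ['-'] := by
      rw [happ, List.take_left' hlen9]
    have hdrop : List.drop 9 (p ++ '-' :: r) = r := by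
      rw [happ, List.drop_left' hlen9]
    have hlow : PySem.Chars.lower (p ++ ['-']) = "projects-".toList := by
      rw [hproj]
      simp only [PySem.Chars.lower, List.map_append] at hl ⊢
      rw [hl]
      rfl
    unfold pvTryHere
    rw [htake, hdrop, hlow]
    by_cases hr : r = []
    · simp [hr]
    · simp [hr, hl]
  · unfold pvTryHere
    rw [if_neg, if_neg]
    · exact fun h => hl h.1
    · rintro ⟨h1, -⟩
      exact hl (hiff.mp h1)

theorem pv_searchB_append (p : List Char) (l : List Char) (hp : '-' ∉ p) :
    pvSearchB (p ++ l) = pvSearchB l := by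
  induction p with
  | nil => rfl
  | cons c p' IH =>
    have hc : c ≠ '-' := fun h => hp (h ▸ List.mem_cons_self ..)
    have hp' : '-' ∉ p' := fun h => hp (List.mem_cons_of_mem _ h)
    simp only [List.cons_append, pvSearchB, if_neg hc]
    exact IH hp'

theorem pv_loopA_cons (p : List Char) (ps : List (List Char)) :
    pvLoopA (p :: ps) =
      if PySem.Chars.lower p = "projects".toList ∧ PySem.Chars.join ['-'] ps ≠ [] then
        some (PySem.Chars.join ['-'] ps)
      else pvLoopA ps := by
  by_cases hl : PySem.Chars.lower p = "projects".toList
  · by_cases hJ : PySem.Chars.join ['-'] ps = []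
    · rw [pvLoopA, if_pos hl]
      simp [hJ]
    · rw [pvLoopA, if_pos hl]
      simp [hJ, hl]
  · rw [pvLoopA, if_neg hl, if_neg (fun h => hl h.1)]

theorem pv_loopA_eq : ∀ ps : List (List Char), (∀ p ∈ ps, '-' ∉ p) →
    pvLoopA ps =
      (match pvTryHere (PySem.Chars.join ['-'] ps) with
       | some r => some r
       | none => pvSearchB (PySem.Chars.join ['-'] ps)) := by
  intro ps
  induction ps with
  | nil => intro _; simp [pvLoopA, PySem.Chars.join_nil, pvTryHere, pvSearchB]
  | cons p ps IH =>
    intro hnd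
    have hp : '-' ∉ p := hnd p (List.mem_cons_self ..)
    have hps : ∀ q ∈ ps, '-' ∉ q := fun q hq => hnd q (List.mem_cons_of_mem _ hq)
    cases ps with
    | nil =>
      rw [PySem.Chars.join_singleton, pv_tryHere_none p hp]
      have hs : pvSearchB p = pvSearchB ([] : List Char) := by
        simpa using pv_searchB_append p [] hp
      rw [pv_loopA_cons]
      simp [PySem.Chars.join_nil, pvLoopA, hs, pvSearchB]
    | cons q ps' =>
      have hJ : PySem.Chars.join ['-'] (p :: q :: ps') =
          p ++ '-' :: PySem.Chars.join ['-'] (q :: ps') := by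
        rw [PySem.Chars.join_cons_cons]; simp
      rw [hJ, pv_tryHere_append p _ hp]
      have hsearch : pvSearchB (p ++ '-' :: PySem.Chars.join ['-'] (q :: ps')) =
          (match pvTryHere (PySem.Chars.join ['-'] (q :: ps')) with
           | some r => some r
           | none => pvSearchB (PySem.Chars.join ['-'] (q :: ps'))) := by
        rw [pv_searchB_append p _ hp]
        rw [pvSearchB, if_pos rfl]
      rw [pv_loopA_cons]
      by_cases hl : PySem.Chars.lower p = "projects".toList ∧
          PySem.Chars.join ['-'] (q :: ps') ≠ []
      · rw [if_pos hl, if_pos hl]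
      · rw [if_neg hl, if_neg hl]
        rw [IH hps, ← hsearch]

theorem pv_splitDash_ne_nil : ∀ l : List Char, pvSplitDash l ≠ [] := by
  intro l
  cases l with
  | nil => simp [pvSplitDash]
  | cons c t =>
    rw [pvSplitDash]
    by_cases hc : c = '-'
    · simp [hc]
    · rw [if_neg hc]
      cases h : pvSplitDash t <;> simp

theorem pv_splitDash_dash (t : List Char) : pvSplitDash ('-' :: t) = [] :: pvSplitDash t := by
  rw [pvSplitDash]; simp

theorem pv_splitDash_cons (c : Char) (t : List Char) (hc : c ≠ '-') :
    pvSplitDash (c :: t) =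
      (match pvSplitDash t with
       | h :: r => (c :: h) :: r
       | [] => [[c]]) := by
  rw [pvSplitDash, if_neg hc]

theorem pv_join_splitDash (l : List Char) :
    PySem.Chars.join ['-'] (pvSplitDash l) = l := by
  induction l with
  | nil => simp [pvSplitDash, PySem.Chars.join_singleton]
  | cons c t IH =>
    obtain ⟨p, r, h⟩ := List.exists_cons_of_ne_nil (pv_splitDash_ne_nil t)
    by_cases hc : c = '-'
    · subst hc
      rw [pv_splitDash_dash, h]
      rw [h] at IH
      rw [PySem.Chars.join_cons_cons]
      simp [IH]
    · rw [pv_splitDash_cons c t hc, h]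
      rw [h] at IH
      cases r with
      | nil =>
        rw [PySem.Chars.join_singleton] at IH
        rw [PySem.Chars.join_singleton, IH]
      | cons p2 r' =>
        rw [PySem.Chars.join_cons_cons] at IH
        rw [PySem.Chars.join_cons_cons]
        simp only [List.cons_append, List.append_assoc] at IH ⊢
        rw [IH]

theorem pv_splitDash_no_dash : ∀ (l : List Char), ∀ p ∈ pvSplitDash l, '-' ∉ p := by
  intro l
  induction l with
  | nil => intro p hp; simp [pvSplitDash] at hp; simp [hp]
  | cons c t IH =>
    intro p hp
    by_cases hc : c = '-'
    · subst hc
      rw [pv_splitDash_dash] at hp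
      rcases List.mem_cons.mp hp with h | h
      · simp [h]
      · exact IH p h
    · rw [pv_splitDash_cons c t hc] at hp
      obtain ⟨q, r, h⟩ := List.exists_cons_of_ne_nil (pv_splitDash_ne_nil t)
      rw [h] at hp
      rcases List.mem_cons.mp hp with h1 | h1
      · subst h1
        intro hm
        rcases List.mem_cons.mp hm with h2 | h2
        · exact hc h2.symm
        · exact IH q (h ▸ List.mem_cons_self ..) h2
      · exact IH p (h ▸ List.mem_cons_of_mem _ h1)

-- ===== VERDICT (by name: the statement is the Claim_ definition above) =====
theorem extract_project_name_ai_spec : Claim_equal_extract_project_name_ai := by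
  intro dirname _
  unfold Spec_extract_project_name_ai extract_project_name_ai extract_project_name_ai_alt
  have h := pv_loopA_eq (pvSplitDash (dirname.toList.dropWhile (· == '-')))
      (pv_splitDash_no_dash _)
  rw [pv_join_splitDash] at h
  show (match pvLoopA (pvSplitDash (dirname.toList.dropWhile (· == '-'))) with
        | some r => String.ofList r
        | none => String.ofList (dirname.toList.dropWhile (· == '-'))) =
      (match (match pvTryHere (dirname.toList.dropWhile (· == '-')) with
              | some r => some r
              | none => pvSearchB (dirname.toList.dropWhile (· == '-'))) with
        | some r => String.ofList r
        | none => String.ofList (dirname.toList.dropWhile (· == '-')))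
  rw [h]
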